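-- pv_equiv track=rewrite | github.com/minhchauU23/PythonCodePtit | daubep.py | solve
-- ===== SOURCE A (Python) =====
-- def solve(arr, start, mid, end):
--     res = 0
--
--     for i in range(start, end):
--         if i > mid:
--             res += abs(arr[mid] +(i-mid))
--         else:
--             res += abs(arr[mid] - arr[i])
--     return res
-- ===== SOURCE B (Python) =====
-- def _abs_range_sum(a, b):
--     # sum of |x| for integer x in a..b inclusive (requires a <= b)
--     if a >= 0:
--         return (a + b) * (b - a + 1) // 2
--     if b <= 0:
--         return (-a - b) * (b - a + 1) // 2
--     return (-a) * (-a + 1) // 2 + b * (b + 1) // 2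
--
--
-- def solve(arr, start, mid, end):
--     if start >= end:
--         return 0
--     v = arr[mid]
--     total = 0
--     for i in range(start, min(mid + 1, end)):
--         total += abs(v - arr[i])
--     lo = max(start, mid + 1) - mid
--     hi = end - 1 - mid
--     if lo <= hi:
--         total += _abs_range_sum(v + lo, v + hi)
--     return total
-- ===== Notes on version B (the rewrite author's own statement) =====
-- stated objective: alternative
-- what changed: The i>mid half of the loop is replaced by a closed-form arithmetic-series formula for the sum of |arr[mid]+d| over consecutive d (split at the sign change), so only the i<=mid prefix is iterated.
import Mathlib
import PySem

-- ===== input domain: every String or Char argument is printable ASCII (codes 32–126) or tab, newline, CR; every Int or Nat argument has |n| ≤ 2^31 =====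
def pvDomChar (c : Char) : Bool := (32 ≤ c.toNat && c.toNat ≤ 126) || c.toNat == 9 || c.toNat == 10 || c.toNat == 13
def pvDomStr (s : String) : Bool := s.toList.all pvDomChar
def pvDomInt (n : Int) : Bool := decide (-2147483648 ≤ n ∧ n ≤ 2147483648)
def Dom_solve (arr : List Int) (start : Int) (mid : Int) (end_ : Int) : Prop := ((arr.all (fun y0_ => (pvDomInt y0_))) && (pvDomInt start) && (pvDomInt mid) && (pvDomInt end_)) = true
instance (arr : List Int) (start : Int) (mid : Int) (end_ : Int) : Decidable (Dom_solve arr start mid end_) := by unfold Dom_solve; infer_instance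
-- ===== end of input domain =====

-- B replaces the i>mid half of A's loop by a closed-form arithmetic-series sum split at the sign change.

-- ===== PORT A =====
def solve (arr : List Int) (start : Int) (mid : Int) (end_ : Int) : Int :=
  (PySem.List.pyRange start end_ 1).foldl
    (fun res i =>
      if i > mid then res + |PySem.List.pyGetD arr mid 0 + (i - mid)|
      else res + |PySem.List.pyGetD arr mid 0 - PySem.List.pyGetD arr i 0|) 0

-- ===== PORT B =====
def absRangeSum (a b : Int) : Int :=
  if 0 ≤ a then PySem.Int.floordiv ((a + b) * (b - a + 1)) 2
  else if b ≤ 0 then PySem.Int.floordiv ((-a - b) * (b - a + 1)) 2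
  else PySem.Int.floordiv ((-a) * (-a + 1)) 2 + PySem.Int.floordiv (b * (b + 1)) 2

def solve_alt (arr : List Int) (start : Int) (mid : Int) (end_ : Int) : Int :=
  if start ≥ end_ then 0
  else
    let v := PySem.List.pyGetD arr mid 0
    let total := (PySem.List.pyRange start (min (mid + 1) end_) 1).foldl
      (fun total i => total + |v - PySem.List.pyGetD arr i 0|) 0
    let lo := max start (mid + 1) - mid
    let hi := end_ - 1 - mid
    if lo ≤ hi then total + absRangeSum (v + lo) (v + hi) else total

-- ===== PRECONDITION & SPEC =====
-- Pre_ excludes exactly the inputs on which A raises IndexError: arr[mid] (read whenever the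
-- range is nonempty) and each arr[i] with i ≤ mid in the range must be valid Python indices.
def Pre_solve (arr : List Int) (start : Int) (mid : Int) (end_ : Int) : Prop :=
  (start < end_ → PySem.Raise.InRange arr.length mid) ∧
  (start < min (mid + 1) end_ →
    -(arr.length : Int) ≤ start ∧ min (mid + 1) end_ - 1 < (arr.length : Int))
instance (arr : List Int) (start : Int) (mid : Int) (end_ : Int) : Decidable (Pre_solve arr start mid end_) := by unfold Pre_solve; infer_instance
def pvWitness_solve : List Int × Int × Int × Int := ([3, 1, 2], 0, 1, 3)

def Spec_solve (arr : List Int) (start : Int) (mid : Int) (end_ : Int) (out : Int) : Prop := out = solve_alt arr start mid end_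
instance (arr : List Int) (start : Int) (mid : Int) (end_ : Int) (out : Int) : Decidable (Spec_solve arr start mid end_ out) := by unfold Spec_solve; infer_instance

-- ===== CLAIM (what is proved, stated in full; the proofs are below) =====
def Claim_equal_solve : Prop := ∀ (arr : List Int) (start : Int) (mid : Int) (end_ : Int), Dom_solve arr start mid end_ → Pre_solve arr start mid end_ → Spec_solve arr start mid end_ (solve arr start mid end_)

-- ===== LEMMAS AND PROOFS =====

lemma ediv2_shift (p q r : Int) (h : p = q + 2 * r) : p / 2 = q / 2 + r := by omega

-- absRangeSum satisfies the recurrence of Σ_{x=a}^{b} |x|.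
lemma absRangeSum_step (a b : Int) (hab : a ≤ b) :
    absRangeSum a b = (if a ≤ b - 1 then absRangeSum a (b - 1) else 0) + |b| := by
  unfold absRangeSum
  simp only [PySem.Int.floordiv_eq_ediv_of_pos (show (0:Int) < 2 by norm_num)]
  split_ifs with h1 h2 h3 h4 h5 h6 h7
  all_goals first
    | rw [abs_of_nonneg (show (0:Int) ≤ b by omega)]
    | rw [abs_of_nonpos (show b ≤ (0:Int) by omega)]
  all_goals first
    | exact ediv2_shift _ _ _ (by ring)
    | omega
    | (have hba : b = a := by omega;
       rw [ediv2_shift ((a+b)*(b-a+1)) 0 b (by linear_combination (a+b-1)*hba)]; omega)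
    | (have hba : b = a := by omega;
       rw [ediv2_shift ((-a-b)*(b-a+1)) 0 (-b) (by linear_combination (-a-b+1)*hba)]; omega)
    | (have hb1 : b = 1 := by omega;
       rw [show (-a-(b-1))*(b-1-a+1) = -a*(-a+1) by linear_combination (-b)*hb1,
           show b*(b+1) = 2*b by linear_combination b*hb1];
       generalize -a*(-a+1) = p; omega)
    | (rw [ediv2_shift (b*(b+1)) ((b-1)*(b-1+1)) b (by ring)]; linarith)

-- folding |· + w| over a length-n integer range equals the closed form absRangeSum.
lemma absFold (w : Int) : ∀ (n : Nat) (a c : Int),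
    (PySem.List.pyRange a (a + n) 1).foldl (fun acc i => acc + |i + w|) c
      = c + (if 1 ≤ (n : Int) then absRangeSum (a + w) (a + n - 1 + w) else 0) := by
  intro n
  induction n with
  | zero => intro a c; simp
  | succ k ih =>
    intro a c
    rw [show a + ((k+1:Nat):Int) = (a + k) + 1 by push_cast; ring,
        PySem.List.pyRange_one_succ_right (by omega : a ≤ a + (k:Int)),
        List.foldl_append, ih a c]
    simp only [List.foldl_cons, List.foldl_nil]
    rw [if_pos (by omega : (1:Int) ≤ ((k+1:Nat):Int)),
        show a + (k:Int) + 1 - 1 + w = a + (k:Int) + w by ring,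
        absRangeSum_step (a + w) (a + (k:Int) + w) (by omega)]
    by_cases hk : 1 ≤ (k:Int)
    · rw [if_pos hk, if_pos (by omega : a + w ≤ a + (k:Int) + w - 1),
          show a + (k:Int) + w - 1 = a + (k:Int) - 1 + w by ring]
      ring
    · rw [if_neg hk, if_neg (by omega : ¬ (a + w ≤ a + (k:Int) + w - 1))]
      ring

theorem solve_eq_alt (arr : List Int) (start mid end_ : Int) :
    solve arr start mid end_ = solve_alt arr start mid end_ := by
  have hcoll1 : ∀ (l : List Int), (∀ i ∈ l, ¬ i > mid) → ∀ init : Int,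
      l.foldl (fun res i =>
        if i > mid then res + |PySem.List.pyGetD arr mid 0 + (i - mid)|
        else res + |PySem.List.pyGetD arr mid 0 - PySem.List.pyGetD arr i 0|) init
      = l.foldl (fun total i =>
          total + |PySem.List.pyGetD arr mid 0 - PySem.List.pyGetD arr i 0|) init := by
    intro l hl init
    apply PySem.List.foldl_congr_mem
    intro acc x hx
    rw [if_neg (hl x hx)]
  have hcoll2 : ∀ (l : List Int), (∀ i ∈ l, i > mid) → ∀ init : Int,
      l.foldl (fun res i =>
        if i > mid then res + |PySem.List.pyGetD arr mid 0 + (i - mid)|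
        else res + |PySem.List.pyGetD arr mid 0 - PySem.List.pyGetD arr i 0|) init
      = l.foldl (fun acc i => acc + |i + (PySem.List.pyGetD arr mid 0 - mid)|) init := by
    intro l hl init
    apply PySem.List.foldl_congr_mem
    intro acc x hx
    rw [if_pos (hl x hx),
        show PySem.List.pyGetD arr mid 0 + (x - mid)
           = x + (PySem.List.pyGetD arr mid 0 - mid) by ring]
  simp only [solve, solve_alt]
  by_cases hse : start ≥ end_
  · rw [if_pos hse, PySem.List.pyRange_one_eq_nil (by omega), List.foldl_nil]
  · rw [if_neg hse]
    have hse' : start < end_ := by omega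
    have h1 : start ≤ max start (min (mid + 1) end_) := le_max_left _ _
    have h2 : max start (min (mid + 1) end_) ≤ end_ := by omega
    rw [PySem.List.pyRange_one_append start (max start (min (mid + 1) end_)) end_ h1 h2,
        List.foldl_append]
    have hrange : PySem.List.pyRange start (max start (min (mid + 1) end_)) 1
        = PySem.List.pyRange start (min (mid + 1) end_) 1 := by
      by_cases hc : start ≤ min (mid + 1) end_
      · rw [max_eq_right hc]
      · rw [PySem.List.pyRange_one_eq_nil (by omega), PySem.List.pyRange_one_eq_nil (by omega)]
    rw [hrange,
        hcoll1 _ (by intro i hi; rw [PySem.List.mem_pyRange_one] at hi; omega) 0]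
    set L := (PySem.List.pyRange start (min (mid + 1) end_) 1).foldl
      (fun total i => total + |PySem.List.pyGetD arr mid 0 - PySem.List.pyGetD arr i 0|) 0 with hL
    by_cases hne : max start (mid + 1) ≤ end_ - 1
    · -- the i > mid part is nonempty
      rw [show max start (min (mid + 1) end_) = max start (mid + 1) by omega,
          hcoll2 _ (by intro i hi; rw [PySem.List.mem_pyRange_one] at hi; omega) L,
          show end_ = max start (mid + 1) + ((end_ - max start (mid + 1)).toNat : Int) by omega,
          absFold, if_pos (by omega), if_pos (by omega)]
      congr 1
      congr 1 <;> ring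
    · -- the i > mid part is empty
      rw [show max start (min (mid + 1) end_) = end_ by omega,
          PySem.List.pyRange_one_eq_nil le_rfl, List.foldl_nil, if_neg (by omega)]

-- ===== VERDICT (by name: the statement is the Claim_ definition above) =====
theorem solve_spec : Claim_equal_solve := by
  intro arr start mid end_ _ _
  exact solve_eq_alt arr start mid end_
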